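-- pv_equiv track=rewrite | github.com/Garrodes/Python | exos.py | nb_de_max
-- ===== SOURCE A (Python) =====
-- def nb_de_max(L):
--   max=L[0]
--   n=0
--   for x in L:
--     if x > max:
--       max=x
--       n=1
--     elif x == max:
--       n+=1
--   return (max,n)
-- ===== SOURCE B (Python) =====
-- def nb_de_max(L):
--   m = max(L)
--   return (m, L.count(m))
-- ===== Notes on version B (the rewrite author's own statement) =====
-- stated objective: simpler
-- what changed: Replaces A's fused running-max-and-count single loop with two built-in passes: m = max(L) then L.count(m).
import Mathlib
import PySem

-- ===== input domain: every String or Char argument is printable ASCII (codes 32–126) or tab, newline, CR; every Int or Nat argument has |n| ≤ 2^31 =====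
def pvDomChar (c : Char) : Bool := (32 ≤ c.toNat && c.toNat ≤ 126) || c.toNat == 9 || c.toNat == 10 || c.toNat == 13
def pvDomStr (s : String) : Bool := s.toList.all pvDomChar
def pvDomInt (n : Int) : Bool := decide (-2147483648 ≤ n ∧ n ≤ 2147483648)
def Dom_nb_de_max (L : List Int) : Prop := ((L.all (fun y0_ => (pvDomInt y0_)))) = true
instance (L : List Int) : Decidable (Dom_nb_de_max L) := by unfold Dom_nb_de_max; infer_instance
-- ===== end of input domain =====

-- B computes max(L) and then counts it (two built-in passes) instead of A's fused
-- running-max-and-count loop; simpler, same cost. Both raise on the empty list (excluded by Pre_).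

-- ===== PORT A =====
def nb_de_max (L : List Int) : Int × Int :=
  match PySem.List.pyGet? L 0 with
  | none => (0, 0)  -- unreachable under Pre_ (Python: IndexError)
  | some m0 =>
    L.foldl (fun (s : Int × Int) x =>
      if x > s.1 then (x, 1)
      else if x = s.1 then (s.1, s.2 + 1)
      else s) (m0, 0)

-- ===== PORT B =====
def nb_de_max_alt (L : List Int) : Int × Int :=
  match PySem.List.max? L (fun y => y) with
  | none => (0, 0)  -- unreachable under Pre_ (Python: ValueError from max)
  | some m => (m, (PySem.List.count L m : Int))

-- ===== PRECONDITION & SPEC =====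
-- Pre_ excludes only the empty list, on which both Pythons raise.
def Pre_nb_de_max (L : List Int) : Prop := L ≠ []
instance (L : List Int) : Decidable (Pre_nb_de_max L) := by unfold Pre_nb_de_max; infer_instance
def pvWitness_nb_de_max : List Int := ([3, 1, 3])

def Spec_nb_de_max (L : List Int) (out : Int × Int) : Prop := out = nb_de_max_alt L
instance (L : List Int) (out : Int × Int) : Decidable (Spec_nb_de_max L out) := by unfold Spec_nb_de_max; infer_instance

-- ===== CLAIM (what is proved, stated in full; the proofs are below) =====
def Claim_equal_nb_de_max : Prop := ∀ (L : List Int), Dom_nb_de_max L → Pre_nb_de_max L → Spec_nb_de_max L (nb_de_max L)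

-- ===== LEMMAS AND PROOFS =====

-- Invariant of A's loop: it returns the running max and the count of that max
-- (plus the carried count n when the max never changes).
theorem nb_de_max_loop (t : List Int) (m n : Int) :
    t.foldl (fun (s : Int × Int) x =>
      if x > s.1 then (x, 1)
      else if x = s.1 then (s.1, s.2 + 1)
      else s) (m, n)
    = (t.foldl max m,
       (if t.foldl max m = m then n else 0) + (t.count (t.foldl max m) : Int)) := by
  induction t generalizing m n with
  | nil => simp
  | cons x t ih =>
    simp only [List.foldl_cons, List.count_cons]
    by_cases hx : x > m
    · simp only [if_pos hx]
      rw [ih]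
      have hmax : max m x = x := by omega
      simp only [hmax]
      have hM := (PySem.List.le_foldl_max t x).1
      have hne : t.foldl max x ≠ m := by omega
      by_cases hxm : t.foldl max x = x <;> simp [hne, hxm] <;> omega
    · have hle : ¬ (x > m) := hx
      simp only [if_neg hle]
      have hmax : max m x = m := by omega
      simp only [hmax]
      by_cases hxe : x = m
      · simp only [if_pos hxe]
        rw [ih]
        have hM := (PySem.List.le_foldl_max t m).1
        by_cases hMm : t.foldl max m = m
        · simp [← hxe]; omega
        · have : ¬ (x = t.foldl max m) := by omega
          simp [hMm, this]
      · simp only [if_neg hxe]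
        rw [ih]
        have hM := (PySem.List.le_foldl_max t m).1
        have : ¬ (x = t.foldl max m) := by omega
        simp [this]

-- ===== VERDICT (by name: the statement is the Claim_ definition above) =====
theorem nb_de_max_spec : Claim_equal_nb_de_max := by
  intro L _ hPre
  unfold Spec_nb_de_max
  cases L with
  | nil => exact absurd rfl hPre
  | cons x t =>
    unfold nb_de_max nb_de_max_alt
    rw [PySem.List.max?_id_cons]
    have hget : PySem.List.pyGet? (x :: t) 0 = some x := by
      simp [PySem.List.pyGet?, PySem.List.pyIdx?]
    rw [hget]
    simp only [List.foldl_cons]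
    simp only [lt_irrefl, if_false, if_true]
    rw [nb_de_max_loop]
    by_cases h : t.foldl max x = x
    · simp [h, PySem.List.count_eq, List.count_cons]; ring
    · simp [h, PySem.List.count_eq, Ne.symm h]
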